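-- pv_equiv track=rewrite | github.com/GolibjonTuxtamatov/fortask | hard_problems.py | labirint
-- ===== SOURCE A (Python) =====
-- def labirint(lst,i=0,j=0):
--     if i==4 and j==6 and lst[i][j]==0:
--         lst[i][j]=9
--         return lst,True
--
--     if i<4 and lst[i+1][j]==0:
--         lst[i][j]=9
--         i+=1
--         return labirint(lst,i,j)
--     elif j<6 and lst[i][j+1]==0:
--         lst[i][j]=9
--         j+=1
--         return labirint(lst,i,j)
--     else:lst[i][j]=9;return lst,False
-- ===== SOURCE B (Python) =====
-- def labirint(lst, i=0, j=0):
--     # Phase 1: walk the maze greedily (down, then right) reading only the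
--     # original grid values, collecting the visited cells and the outcome.
--     path = []
--     ok = None
--     while ok is None:
--         path.append((i, j))
--         if i == 4 and j == 6 and lst[i][j] == 0:
--             ok = True
--         elif i < 4 and lst[i + 1][j] == 0:
--             i += 1
--         elif j < 6 and lst[i][j + 1] == 0:
--             j += 1
--         else:
--             ok = False
--     # Phase 2: mark every visited cell with 9.
--     for r, c in path:
--         lst[r][c] = 9
--     return lst, ok
-- ===== Notes on version B (the rewrite author's own statement) =====
-- stated objective: alternative
-- what changed: Replaces A's mark-as-you-go self-recursion by two separate phases: an iterative walk that only reads the original grid and collects the visited cells plus the outcome, then a single pass that marks every collected cell with 9.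
-- outside the precondition, e.g. on labirint([[0, 0], [0, 0]], -2, -2): A returns ([[9, 9], [9, 9]], False), B raises IndexError
import Mathlib
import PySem

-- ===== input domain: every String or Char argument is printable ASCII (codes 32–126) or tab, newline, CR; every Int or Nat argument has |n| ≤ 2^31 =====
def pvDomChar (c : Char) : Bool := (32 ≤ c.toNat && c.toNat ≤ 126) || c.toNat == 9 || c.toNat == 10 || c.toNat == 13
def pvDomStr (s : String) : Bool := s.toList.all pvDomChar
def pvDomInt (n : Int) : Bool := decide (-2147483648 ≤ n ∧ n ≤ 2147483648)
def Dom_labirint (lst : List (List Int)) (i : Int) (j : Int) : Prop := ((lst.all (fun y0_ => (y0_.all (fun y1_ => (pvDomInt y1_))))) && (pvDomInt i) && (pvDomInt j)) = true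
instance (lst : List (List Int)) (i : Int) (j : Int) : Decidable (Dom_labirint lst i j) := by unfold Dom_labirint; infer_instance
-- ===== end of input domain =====

-- B changes the decomposition: it first walks the maze reading only the original grid,
-- collecting the visited cells and the outcome, and then marks all collected cells with 9
-- in one pass (A marks each cell before recursing). Both Pythons mutate lst in place on the
-- same cells; the equivalence proved here is about the RETURN value.

-- Shared transliteration of the Pythons' indexing: 'lst[r][c]' and 'lst[r][c] = 9'
-- (default 9 / no-op only outside Pre_, where Python raises IndexError).
def pvCell (lst : List (List Int)) (r c : Int) : Int :=
  PySem.List.pyGetD (PySem.List.pyGetD lst r []) c 9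

def pvMark (lst : List (List Int)) (r c : Int) : List (List Int) :=
  PySem.List.pySetD lst r (PySem.List.pySetD (PySem.List.pyGetD lst r []) c 9)

-- ===== PORT A =====
def labirint (lst : List (List Int)) (i : Int) (j : Int) : List (List Int) × Bool :=
  if i = 4 ∧ j = 6 ∧ pvCell lst i j = 0 then (pvMark lst i j, true)
  else if i < 4 ∧ pvCell lst (i + 1) j = 0 then labirint (pvMark lst i j) (i + 1) j
  else if j < 6 ∧ pvCell lst i (j + 1) = 0 then labirint (pvMark lst i j) i (j + 1)
  else (pvMark lst i j, false)
termination_by ((4 - i).toNat + (6 - j).toNat)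
decreasing_by all_goals omega

-- ===== PORT B =====
-- Phase 1 of Source B: the while-loop that collects the visited cells and the outcome,
-- reading only the original (unmutated) grid.
def labPath (lst : List (List Int)) (i : Int) (j : Int) : List (Int × Int) × Bool :=
  if i = 4 ∧ j = 6 ∧ pvCell lst i j = 0 then ([(i, j)], true)
  else if i < 4 ∧ pvCell lst (i + 1) j = 0 then
    let pr := labPath lst (i + 1) j
    ((i, j) :: pr.1, pr.2)
  else if j < 6 ∧ pvCell lst i (j + 1) = 0 then
    let pr := labPath lst i (j + 1)
    ((i, j) :: pr.1, pr.2)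
  else ([(i, j)], false)
termination_by ((4 - i).toNat + (6 - j).toNat)
decreasing_by all_goals omega

-- Phase 2 of Source B: mark every collected cell with 9.
def labirint_alt (lst : List (List Int)) (i : Int) (j : Int) : List (List Int) × Bool :=
  let pr := labPath lst i j
  (pr.1.foldl (fun acc rc => pvMark acc rc.1 rc.2) lst, pr.2)

-- ===== PRECONDITION & SPEC =====
-- Pre_ admits immediate success at (4,6), any start whose probed neighbours are in range and
-- nonzero (the walk stops at once), and a nonnegative start on a grid covering the walk's
-- reachable rectangle (rows 0..max(i,4), columns 0..max(j,6)); it excludes the inputs where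
-- A's data-dependent walk runs off the grid (IndexError) together with the remaining
-- multi-step walks — ragged nonneg-start grids where the walk happens to stay in range (A
-- returns and B returns the same value; excluded only because IndexError-freedom of the
-- data-dependent walk is not a closed-form shape condition) and negative starts, where A's
-- negative-index-wraparound marking can alias cells of the remaining walk and terminate it
-- while B's walk over the original grid runs off the grid and raises IndexError.
def Pre_labirint (lst : List (List Int)) (i : Int) (j : Int) : Prop :=
  (i = 4 ∧ j = 6 ∧ PySem.Raise.InRange lst.length i ∧
    PySem.Raise.InRange (PySem.List.pyGetD lst i []).length j ∧ pvCell lst i j = 0) ∨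
  ((i < 4 → PySem.Raise.InRange lst.length (i + 1) ∧
      PySem.Raise.InRange (PySem.List.pyGetD lst (i + 1) []).length j ∧
      pvCell lst (i + 1) j ≠ 0) ∧
   (j < 6 → PySem.Raise.InRange lst.length i ∧
      PySem.Raise.InRange (PySem.List.pyGetD lst i []).length (j + 1) ∧
      pvCell lst i (j + 1) ≠ 0) ∧
   PySem.Raise.InRange lst.length i ∧
   PySem.Raise.InRange (PySem.List.pyGetD lst i []).length j) ∨
  (0 ≤ i ∧ 0 ≤ j ∧ max i 4 < (lst.length : Int) ∧ ∀ row ∈ lst, max j 6 < (row.length : Int))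
instance (lst : List (List Int)) (i : Int) (j : Int) : Decidable (Pre_labirint lst i j) := by
  unfold Pre_labirint; infer_instance

def pvWitness_labirint : List (List Int) × Int × Int :=
  ([[0,0,0,0,0,0,0],[0,0,0,0,0,0,0],[0,0,0,0,0,0,0],[0,0,0,0,0,0,0],[0,0,0,0,0,0,0]], 0, 0)

def Spec_labirint (lst : List (List Int)) (i : Int) (j : Int) (out : List (List Int) × Bool) : Prop :=
  out = labirint_alt lst i j
instance (lst : List (List Int)) (i : Int) (j : Int) (out : List (List Int) × Bool) : Decidable (Spec_labirint lst i j out) := by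
  unfold Spec_labirint; infer_instance

-- ===== CLAIM (what is proved, stated in full; the proofs are below) =====
def Claim_equal_labirint : Prop := ∀ (lst : List (List Int)) (i : Int) (j : Int), Dom_labirint lst i j → Pre_labirint lst i j → Spec_labirint lst i j (labirint lst i j)

-- ===== LEMMAS AND PROOFS =====

-- Nat-level: setting one cell leaves every different cell's value unchanged
theorem getD_set2_ne (lst : List (List Int)) (a b r c : Nat) (h : a ≠ r ∨ b ≠ c) :
    ((lst.set a ((lst.getD a []).set b 9)).getD r []).getD c 9 = (lst.getD r []).getD c 9 := by
  simp only [List.getD_eq_getElem?_getD, List.getElem?_set]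
  rcases h with h | h
  · simp [h]
  · by_cases hrow : a = r
    · subst hrow
      by_cases hlen : a < lst.length
      · simp [hlen, h]
      · simp [hlen]
    · simp [hrow]

-- reading a nonnegative cell distinct from a nonnegative marked cell is unchanged
theorem pvCell_pvMark_ne (lst : List (List Int)) (a b r c : Int)
    (ha : 0 ≤ a) (hb : 0 ≤ b) (hr : 0 ≤ r) (hc : 0 ≤ c) (hne : ¬(a = r ∧ b = c)) :
    pvCell (pvMark lst a b) r c = pvCell lst r c := by
  unfold pvCell pvMark
  simp only [PySem.List.pySetD_of_nonneg _ _ ha, PySem.List.pySetD_of_nonneg _ _ hb,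
    PySem.List.pyGetD_of_nonneg _ _ ha, PySem.List.pyGetD_of_nonneg _ _ hr,
    PySem.List.pyGetD_of_nonneg _ _ hc]
  exact getD_set2_ne lst a.toNat b.toNat r.toNat c.toNat (by omega)

-- the walk of phase 1 never reads a cell at or behind an already-marked cell
theorem labPath_pvMark (lst : List (List Int)) (i j : Int) :
    ∀ a b : Int, 0 ≤ a → 0 ≤ b → a ≤ i → b ≤ j → ¬(a = i ∧ b = j) →
      labPath (pvMark lst a b) i j = labPath lst i j := by
  induction i, j using labPath.induct lst with
  | case1 i j h =>
    intro a b ha hb hai hbj hne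
    obtain ⟨hi, hj, h0⟩ := h
    conv_lhs => rw [labPath]
    conv_rhs => rw [labPath]
    rw [pvCell_pvMark_ne lst a b i j ha hb (by omega) (by omega) hne]
    rw [if_pos ⟨hi, hj, h0⟩, if_pos ⟨hi, hj, h0⟩]
  | case2 i j h1 h2 ih =>
    intro a b ha hb hai hbj hne
    obtain ⟨hi4, h0⟩ := h2
    conv_lhs => rw [labPath]
    conv_rhs => rw [labPath]
    rw [pvCell_pvMark_ne lst a b i j ha hb (by omega) (by omega) hne,
        pvCell_pvMark_ne lst a b (i + 1) j ha hb (by omega) (by omega) (by omega)]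
    rw [if_neg h1, if_neg h1, if_pos ⟨hi4, h0⟩, if_pos ⟨hi4, h0⟩]
    rw [ih a b ha hb (by omega) hbj (by omega)]
  | case3 i j h1 h2 h3 ih =>
    intro a b ha hb hai hbj hne
    obtain ⟨hj6, h0⟩ := h3
    conv_lhs => rw [labPath]
    conv_rhs => rw [labPath]
    rw [pvCell_pvMark_ne lst a b i j ha hb (by omega) (by omega) hne,
        pvCell_pvMark_ne lst a b (i + 1) j ha hb (by omega) (by omega) (by omega),
        pvCell_pvMark_ne lst a b i (j + 1) ha hb (by omega) (by omega) (by omega)]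
    rw [if_neg h1, if_neg h1, if_neg h2, if_neg h2, if_pos ⟨hj6, h0⟩, if_pos ⟨hj6, h0⟩]
    rw [ih a b ha hb hai (by omega) (by omega)]
  | case4 i j h1 h2 h3 =>
    intro a b ha hb hai hbj hne
    conv_lhs => rw [labPath]
    conv_rhs => rw [labPath]
    rw [pvCell_pvMark_ne lst a b i j ha hb (by omega) (by omega) hne,
        pvCell_pvMark_ne lst a b (i + 1) j ha hb (by omega) (by omega) (by omega),
        pvCell_pvMark_ne lst a b i (j + 1) ha hb (by omega) (by omega) (by omega)]
    rw [if_neg h1, if_neg h1, if_neg h2, if_neg h2, if_neg h3, if_neg h3]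

-- A's mark-then-recurse walk equals B's collect-then-mark decomposition
theorem labirint_eq_alt (lst : List (List Int)) (i j : Int) (hi : 0 ≤ i) (hj : 0 ≤ j) :
    labirint lst i j =
      ((labPath lst i j).1.foldl (fun acc rc => pvMark acc rc.1 rc.2) lst, (labPath lst i j).2) := by
  induction lst, i, j using labirint.induct with
  | case1 lst i j h =>
    conv_lhs => rw [labirint]
    conv_rhs => rw [labPath]
    rw [if_pos h, if_pos h]
    simp
  | case2 lst i j h1 h2 ih =>
    conv_lhs => rw [labirint]
    conv_rhs => rw [labPath]
    rw [if_neg h1, if_neg h1, if_pos h2, if_pos h2]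
    rw [ih (by omega) hj]
    rw [labPath_pvMark lst (i + 1) j i j hi hj (by omega) le_rfl (by omega)]
    simp
  | case3 lst i j h1 h2 h3 ih =>
    conv_lhs => rw [labirint]
    conv_rhs => rw [labPath]
    rw [if_neg h1, if_neg h1, if_neg h2, if_neg h2, if_pos h3, if_pos h3]
    rw [ih hi (by omega)]
    rw [labPath_pvMark lst i (j + 1) i j hi hj le_rfl (by omega) (by omega)]
    simp
  | case4 lst i j h1 h2 h3 =>
    conv_lhs => rw [labirint]
    conv_rhs => rw [labPath]
    rw [if_neg h1, if_neg h1, if_neg h2, if_neg h2, if_neg h3, if_neg h3]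
    simp

-- ===== VERDICT (by name: the statement is the Claim_ definition above) =====
theorem labirint_spec : Claim_equal_labirint := by
  intro lst i j _hdom hpre
  unfold Spec_labirint labirint_alt
  rcases hpre with ⟨hi, hj, _, _, h0⟩ | ⟨g2, g3, _⟩ | ⟨hi, hj, _, _⟩
  · subst hi; subst hj
    conv_lhs => rw [labirint]
    conv_rhs => rw [labPath]
    rw [if_pos ⟨rfl, rfl, h0⟩, if_pos ⟨rfl, rfl, h0⟩]
    simp
  · conv_lhs => rw [labirint]
    conv_rhs => rw [labPath]
    by_cases hg1 : i = 4 ∧ j = 6 ∧ pvCell lst i j = 0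
    · rw [if_pos hg1, if_pos hg1]; simp
    · have hg2 : ¬(i < 4 ∧ pvCell lst (i + 1) j = 0) := by
        rintro ⟨h4, h0⟩; exact (g2 h4).2.2 h0
      have hg3 : ¬(j < 6 ∧ pvCell lst i (j + 1) = 0) := by
        rintro ⟨h6, h0⟩; exact (g3 h6).2.2 h0
      rw [if_neg hg1, if_neg hg1, if_neg hg2, if_neg hg2, if_neg hg3, if_neg hg3]
      simp
  · exact labirint_eq_alt lst i j hi hj
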